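-- pv_equiv track=rewrite | github.com/mkXultra/mew | src/mew/implement_lane/native_finish_gate.py | _semantic_tokens
-- ===== SOURCE A (Python) =====
-- def _basename(token: str) -> str:
--     return token.rsplit("/", 1)[-1] if token else ""
--
-- def _semantic_tokens(tokens: tuple[str, ...]) -> tuple[str, ...]:
--     remaining = list(tokens)
--     while remaining:
--         first = _basename(remaining[0])
--         if first == "env":
--             remaining.pop(0)
--             while remaining and _looks_like_assignment(remaining[0]):
--                 remaining.pop(0)
--             continue
--         if first == "command":
--             remaining.pop(0)
--             continue
--         if _looks_like_assignment(remaining[0]):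
--             remaining.pop(0)
--             continue
--         break
--     return tuple(remaining)
--
-- def _looks_like_assignment(token: str) -> bool:
--     if "=" not in token or token.startswith("="):
--         return False
--     name = token.split("=", 1)[0]
--     return name.replace("_", "").isalnum()
-- ===== SOURCE B (Python) =====
-- def _basename(token: str) -> str:
--     return token.rsplit("/", 1)[-1] if token else ""
--
-- def _looks_like_assignment(token: str) -> bool:
--     if "=" not in token or token.startswith("="):
--         return False
--     name = token.split("=", 1)[0]
--     return name.replace("_", "").isalnum()
--
-- def _is_prefix_token(token: str) -> bool:
--     base = _basename(token)
--     return base == "env" or base == "command" or _looks_like_assignment(token)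
--
-- def _semantic_tokens(tokens: tuple[str, ...]) -> tuple[str, ...]:
--     # one flat drop-while scan: drop the maximal leading run of prefix tokens
--     i = 0
--     while i < len(tokens) and _is_prefix_token(tokens[i]):
--         i += 1
--     return tuple(tokens[i:])
-- ===== Notes on version B (the rewrite author's own statement) =====
-- stated objective: simpler
-- what changed: Replaces A's nested while/continue state machine (with a redundant inner assignment-consuming loop after 'env') by one flat drop-while scan with a single prefix-token predicate.
import Mathlib
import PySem

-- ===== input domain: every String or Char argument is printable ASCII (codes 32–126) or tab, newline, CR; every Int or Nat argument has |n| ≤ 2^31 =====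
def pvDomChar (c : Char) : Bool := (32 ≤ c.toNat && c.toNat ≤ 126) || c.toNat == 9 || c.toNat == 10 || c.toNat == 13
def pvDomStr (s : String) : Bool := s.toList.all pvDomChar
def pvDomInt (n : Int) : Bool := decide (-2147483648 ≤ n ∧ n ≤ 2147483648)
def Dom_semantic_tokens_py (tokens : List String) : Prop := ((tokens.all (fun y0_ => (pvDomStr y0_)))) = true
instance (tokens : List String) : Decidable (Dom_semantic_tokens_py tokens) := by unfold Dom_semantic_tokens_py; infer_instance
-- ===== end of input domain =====

-- B replaces A's nested while/continue state machine by one flat drop-while scan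
-- with a single prefix-token predicate (objective: simpler; return value only).


-- ===== PORT A =====
-- _basename: token.rsplit("/", 1)[-1] if token else ""
-- (rsplit("/",1)[-1] = the part after the LAST '/', or the whole string if none; exact via Str.rfind/slice)
def pyBasename (token : String) : String :=
  if token == "" then ""
  else
    let i := PySem.Str.rfind token "/"
    if i == -1 then token else PySem.Str.slice token (some (i + 1)) none

-- _looks_like_assignment, step for step
def pyLooksAssign (token : String) : Bool :=
  if !(PySem.Str.isIn "=" token) || PySem.Str.startswith token "=" then false
  else
    let name := PySem.Str.slice token none (some (PySem.Str.find token "="))  -- token.split("=",1)[0]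
    PySem.Str.strIsalnum (PySem.Str.replace name "_" "")

-- inner loop: while remaining and _looks_like_assignment(remaining[0]): remaining.pop(0)
def pvDropAssigns : List String → List String
  | [] => []
  | t :: rest => if pyLooksAssign t then pvDropAssigns rest else t :: rest

theorem pvDropAssigns_length_le (l : List String) : (pvDropAssigns l).length ≤ l.length := by
  induction l with
  | nil => simp [pvDropAssigns]
  | cons t rest ih =>
    simp only [pvDropAssigns]
    split
    · exact le_trans ih (Nat.le_succ _)
    · simp

-- outer while loop of _semantic_tokens, branch for branch
def semantic_tokens_py : List String → List String
  | [] => []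
  | t :: rest =>
    if pyBasename t == "env" then semantic_tokens_py (pvDropAssigns rest)
    else if pyBasename t == "command" then semantic_tokens_py rest
    else if pyLooksAssign t then semantic_tokens_py rest
    else t :: rest
termination_by l => l.length
decreasing_by
  · exact Nat.lt_succ_of_le (pvDropAssigns_length_le rest)
  · simp
  · simp

-- ===== PORT B =====
-- _is_prefix_token
def pvIsPrefixTok (token : String) : Bool :=
  pyBasename token == "env" || pyBasename token == "command" || pyLooksAssign token

-- the flat scan: advance past the leading prefix tokens, return the rest
def semantic_tokens_py_alt : List String → List String
  | [] => []
  | t :: rest => if pvIsPrefixTok t then semantic_tokens_py_alt rest else t :: rest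

-- ===== PRECONDITION & SPEC =====
def Spec_semantic_tokens_py (tokens : List String) (out : List String) : Prop := out = semantic_tokens_py_alt tokens
instance (tokens : List String) (out : List String) : Decidable (Spec_semantic_tokens_py tokens out) := by unfold Spec_semantic_tokens_py; infer_instance

-- ===== CLAIM (what is proved, stated in full; the proofs are below) =====
def Claim_equal_semantic_tokens_py : Prop := ∀ (tokens : List String), Dom_semantic_tokens_py tokens → Spec_semantic_tokens_py tokens (semantic_tokens_py tokens)

-- ===== LEMMAS AND PROOFS =====

-- dropping leading assignments first does not change B's result: assignments are prefix tokens
theorem alt_dropAssigns (l : List String) :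
    semantic_tokens_py_alt (pvDropAssigns l) = semantic_tokens_py_alt l := by
  induction l with
  | nil => rfl
  | cons t rest ih =>
    by_cases h : pyLooksAssign t = true
    · have hp : pvIsPrefixTok t = true := by simp [pvIsPrefixTok, h]
      simp [pvDropAssigns, h, semantic_tokens_py_alt, hp, ih]
    · simp [pvDropAssigns, h]

theorem semA_eq_alt : ∀ (n : ℕ) (l : List String), l.length ≤ n →
    semantic_tokens_py l = semantic_tokens_py_alt l := by
  intro n
  induction n with
  | zero =>
    intro l hl
    have : l = [] := List.length_eq_zero_iff.mp (Nat.le_zero.mp hl)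
    subst this; simp [semantic_tokens_py, semantic_tokens_py_alt]
  | succ n ih =>
    intro l hl
    match l with
    | [] => simp [semantic_tokens_py, semantic_tokens_py_alt]
    | t :: rest =>
      have hr : rest.length ≤ n := Nat.lt_succ_iff.mp (by simpa using hl)
      by_cases h1 : pyBasename t == "env"
      · have hp : pvIsPrefixTok t = true := by simp [pvIsPrefixTok, h1]
        rw [semantic_tokens_py, if_pos h1,
          ih _ (le_trans (pvDropAssigns_length_le rest) hr), alt_dropAssigns]
        simp [semantic_tokens_py_alt, hp]
      · by_cases h2 : pyBasename t == "command"
        · have hp : pvIsPrefixTok t = true := by simp [pvIsPrefixTok, h2]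
          rw [semantic_tokens_py, if_neg h1, if_pos h2, ih _ hr]
          simp [semantic_tokens_py_alt, hp]
        · by_cases h3 : pyLooksAssign t = true
          · have hp : pvIsPrefixTok t = true := by simp [pvIsPrefixTok, h3]
            rw [semantic_tokens_py, if_neg h1, if_neg h2, if_pos h3, ih _ hr]
            simp [semantic_tokens_py_alt, hp]
          · have hp : pvIsPrefixTok t = false := by
              simp [pvIsPrefixTok, h3]
              exact ⟨by simpa using h1, by simpa using h2⟩
            rw [semantic_tokens_py, if_neg h1, if_neg h2, if_neg h3]
            simp [semantic_tokens_py_alt, hp]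

-- ===== VERDICT (by name: the statement is the Claim_ definition above) =====
theorem semantic_tokens_py_spec : Claim_equal_semantic_tokens_py := by
  intro tokens _
  unfold Spec_semantic_tokens_py
  exact semA_eq_alt tokens.length tokens le_rfl
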